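-- pv_equiv track=rewrite | github.com/ucinlp/facade | util/misc.py | extract_hypothesis
-- ===== SOURCE A (Python) =====
-- def extract_hypothesis(nli_input: [str]):
--     """
--     Given an NLI input to BERT, extract only the tokens
--     for the hypothesis.
--     """
--     tokens = []
--
--     encountered_sep = False
--     for token in nli_input:
--         if token != "[SEP]" and encountered_sep:
--             tokens.append(token)
--
--         if token == "[SEP]":
--             encountered_sep = True
--
--     return tokens
-- ===== SOURCE B (Python) =====
-- def extract_hypothesis(nli_input: [str]):
--     """Locate the first [SEP], then filter the tail slice."""
--     if "[SEP]" not in nli_input: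
--         return []
--     idx = nli_input.index("[SEP]")
--     return [t for t in nli_input[idx + 1:] if t != "[SEP]"]
-- ===== Notes on version B (the rewrite author's own statement) =====
-- stated objective: simpler
-- what changed: Replaces the stateful boolean-flag loop with a locate-then-filter decomposition: find the first [SEP] index and filter the tail slice.
import Mathlib
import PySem

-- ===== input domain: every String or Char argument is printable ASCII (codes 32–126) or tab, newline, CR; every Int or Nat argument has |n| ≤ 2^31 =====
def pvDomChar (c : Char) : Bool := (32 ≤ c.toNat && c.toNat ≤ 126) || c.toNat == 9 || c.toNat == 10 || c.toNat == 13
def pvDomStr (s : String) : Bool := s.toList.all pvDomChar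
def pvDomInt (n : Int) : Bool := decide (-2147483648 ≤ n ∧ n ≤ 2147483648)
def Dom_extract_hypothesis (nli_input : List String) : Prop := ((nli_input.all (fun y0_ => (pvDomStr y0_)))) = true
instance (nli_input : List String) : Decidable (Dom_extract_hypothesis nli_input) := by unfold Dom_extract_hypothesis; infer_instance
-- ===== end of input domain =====

-- B replaces A's stateful boolean-flag loop by a locate-then-filter decomposition (objective: simpler).

-- ===== PORT A =====
-- A's loop body (flag checked before it is updated, exactly as in the Python)
def extract_hypothesis_step (st : List String × Bool) (token : String) : List String × Bool :=
  let tokens := if token ≠ "[SEP]" ∧ st.2 = true then st.1 ++ [token] else st.1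
  let encountered_sep := if token = "[SEP]" then true else st.2
  (tokens, encountered_sep)

def extract_hypothesis (nli_input : List String) : List String :=
  (nli_input.foldl extract_hypothesis_step ([], false)).1

-- ===== PORT B =====
def extract_hypothesis_alt (nli_input : List String) : List String :=
  if "[SEP]" ∈ nli_input then
    match PySem.List.index? nli_input "[SEP]" with
    | some idx => (PySem.List.slice nli_input (some ((idx : Int) + 1)) none).filter
        (fun t => t ≠ "[SEP]")
    | none => []
  else []

-- ===== PRECONDITION & SPEC =====
def Spec_extract_hypothesis (nli_input : List String) (out : List String) : Prop := out = extract_hypothesis_alt nli_input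
instance (nli_input : List String) (out : List String) : Decidable (Spec_extract_hypothesis nli_input out) := by unfold Spec_extract_hypothesis; infer_instance

-- ===== CLAIM (what is proved, stated in full; the proofs are below) =====
def Claim_equal_extract_hypothesis : Prop := ∀ (nli_input : List String), Dom_extract_hypothesis nli_input → Spec_extract_hypothesis nli_input (extract_hypothesis nli_input)

-- ===== LEMMAS AND PROOFS =====

-- Once the flag is true, A's loop appends exactly the non-[SEP] tokens of the remainder.
theorem extract_hypothesis_loop_true (xs : List String) (acc : List String) :
    (xs.foldl extract_hypothesis_step (acc, true)).1
      = acc ++ xs.filter (fun t => t ≠ "[SEP]") := by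
  induction xs generalizing acc with
  | nil => simp
  | cons x xs ih =>
    rw [List.foldl_cons]
    by_cases hx : x = "[SEP]"
    · have h : extract_hypothesis_step (acc, true) x = (acc, true) := by
        simp [extract_hypothesis_step, hx]
      rw [h, ih]; simp [hx]
    · have h : extract_hypothesis_step (acc, true) x = (acc ++ [x], true) := by
        simp [extract_hypothesis_step, hx]
      rw [h, ih]; simp [hx]

theorem extract_hypothesis_eq (xs : List String) :
    extract_hypothesis xs = extract_hypothesis_alt xs := by
  induction xs with
  | nil => simp [extract_hypothesis, extract_hypothesis_alt]
  | cons x xs ih =>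
    by_cases hx : x = "[SEP]"
    · subst hx
      have h : extract_hypothesis_step ([], false) "[SEP]" = ([], true) := by
        simp [extract_hypothesis_step]
      unfold extract_hypothesis extract_hypothesis_alt
      rw [List.foldl_cons, h, extract_hypothesis_loop_true,
        if_pos (List.mem_cons_self (l := xs)), PySem.List.index?_cons_self]
      simp [PySem.List.slice_from_one]
    · have h : extract_hypothesis_step ([], false) x = ([], false) := by
        simp [extract_hypothesis_step, hx]
      have hstep : extract_hypothesis (x :: xs) = extract_hypothesis xs := by
        unfold extract_hypothesis; rw [List.foldl_cons, h]
      rw [hstep, ih]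
      unfold extract_hypothesis_alt
      by_cases hm : "[SEP]" ∈ xs
      · have hm' : "[SEP]" ∈ x :: xs := List.mem_cons_of_mem _ hm
        obtain ⟨i, hi⟩ := Option.isSome_iff_exists.mp
          ((PySem.List.index?_isSome_iff xs "[SEP]").mpr hm)
        rw [if_pos hm, if_pos hm', PySem.List.index?_cons_of_ne xs hx, hi]
        simp only [Option.map_some]
        have h1 : (i : Int) + 1 = ((i + 1 : Nat) : Int) := by push_cast; ring
        have h2 : ((i + 1 : Nat) : Int) + 1 = ((i + 2 : Nat) : Int) := by push_cast; ring
        rw [h1, h2, PySem.List.slice_from_natCast, PySem.List.slice_from_natCast]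
        rfl
      · have hm' : "[SEP]" ∉ x :: xs := by
          intro hmem
          rcases List.mem_cons.mp hmem with hh | hh
          · exact hx hh.symm
          · exact hm hh
        rw [if_neg hm, if_neg hm']

-- ===== VERDICT (by name: the statement is the Claim_ definition above) =====
theorem extract_hypothesis_spec : Claim_equal_extract_hypothesis := by
  intro xs _
  exact extract_hypothesis_eq xs
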